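-- pv_equiv track=rewrite | github.com/lstbl/DENV_cleavage_predictor | python_scripts/cleavage_model_helper_functions.py | merge_two_dicts
-- ===== SOURCE A (Python) =====
-- def merge_two_dicts(x,y):
--     z = {}
--     for entry in x:
--         if entry not in y:
--             z[entry] = x[entry]
--     for entry in y:
--         if entry not in x:
--             z[entry] = y[entry]
--     return z
-- ===== SOURCE B (Python) =====
-- def merge_two_dicts(x, y):
--     merged = {**x, **y}
--     shared = x.keys() & y.keys()
--     return {k: v for k, v in merged.items() if k not in shared}
-- ===== Notes on version B (the rewrite author's own statement) =====
-- stated objective: idiomatic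
-- what changed: Instead of two membership-filtered insertion loops, B builds the full merge {**x, **y} and the shared-key set once, then produces the result in a single filtered comprehension over the merged items.
import Mathlib
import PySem

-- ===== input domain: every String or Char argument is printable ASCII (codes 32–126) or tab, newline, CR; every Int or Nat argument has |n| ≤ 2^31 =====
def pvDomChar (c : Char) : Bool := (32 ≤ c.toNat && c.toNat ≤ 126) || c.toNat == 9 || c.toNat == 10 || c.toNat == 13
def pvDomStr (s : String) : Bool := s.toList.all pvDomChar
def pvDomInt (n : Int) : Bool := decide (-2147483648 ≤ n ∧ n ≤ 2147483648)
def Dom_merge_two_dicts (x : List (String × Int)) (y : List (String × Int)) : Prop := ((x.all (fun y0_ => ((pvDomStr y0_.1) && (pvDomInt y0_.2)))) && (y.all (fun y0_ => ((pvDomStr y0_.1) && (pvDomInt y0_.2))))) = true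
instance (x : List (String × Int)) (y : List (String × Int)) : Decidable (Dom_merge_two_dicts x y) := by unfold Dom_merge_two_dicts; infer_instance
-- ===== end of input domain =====

-- B builds the full merge {**x, **y} and the shared-key set once, then emits the result in a
-- single filtered pass over the merged items (idiomatic restructuring; same asymptotic cost).

-- ===== PORT A =====
def merge_two_dicts (x : List (String × Int)) (y : List (String × Int)) : List (String × Int) :=
  let xd : PySem.Dict String Int := PySem.Dict.mk x
  let yd : PySem.Dict String Int := PySem.Dict.mk y
  -- z = {}; for entry in x: if entry not in y: z[entry] = x[entry]
  let z : PySem.Dict String Int :=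
    x.foldl (fun z e => if !(yd.contains e.1) then z.insert e.1 (xd.getD e.1 0) else z)
      PySem.Dict.empty
  -- for entry in y: if entry not in x: z[entry] = y[entry]
  let z :=
    y.foldl (fun z e => if !(xd.contains e.1) then z.insert e.1 (yd.getD e.1 0) else z) z
  z.items

-- ===== PORT B =====
def merge_two_dicts_alt (x : List (String × Int)) (y : List (String × Int)) : List (String × Int) :=
  -- merged = {**x, **y}
  let merged : PySem.Dict String Int :=
    y.foldl (fun d e => d.insert e.1 e.2) (PySem.Dict.mk x)
  -- shared = x.keys() & y.keys()
  let shared : PySem.Set String :=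
    PySem.Set.inter (PySem.Set.ofList (x.map Prod.fst)) (y.map Prod.fst)
  -- {k: v for k, v in merged.items() if k not in shared}
  merged.items.filter (fun e => !(PySem.Set.contains shared e.1))

-- ===== PRECONDITION & SPEC =====
-- Pre_ requires each input list to have pairwise-distinct keys: the arguments are Python
-- dicts, and an association list with a duplicated key does not represent any dict.
def Pre_merge_two_dicts (x : List (String × Int)) (y : List (String × Int)) : Prop :=
  (x.map Prod.fst).Nodup ∧ (y.map Prod.fst).Nodup
instance (x : List (String × Int)) (y : List (String × Int)) : Decidable (Pre_merge_two_dicts x y) := by unfold Pre_merge_two_dicts; infer_instance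

def pvWitness_merge_two_dicts : (List (String × Int)) × (List (String × Int)) :=
  ([("a", 1), ("b", 2)], [("b", 3), ("c", 4)])

def Spec_merge_two_dicts (x : List (String × Int)) (y : List (String × Int)) (out : List (String × Int)) : Prop := out = merge_two_dicts_alt x y
instance (x : List (String × Int)) (y : List (String × Int)) (out : List (String × Int)) : Decidable (Spec_merge_two_dicts x y out) := by unfold Spec_merge_two_dicts; infer_instance

-- ===== CLAIM (what is proved, stated in full; the proofs are below) =====
def Claim_equal_merge_two_dicts : Prop := ∀ (x : List (String × Int)) (y : List (String × Int)), Dom_merge_two_dicts x y → Pre_merge_two_dicts x y → Spec_merge_two_dicts x y (merge_two_dicts x y)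

-- ===== LEMMAS AND PROOFS =====

-- A's loop shape: inserting fresh distinct keys under a guard appends the guarded entries.
theorem foldl_guard_insert_items (l : List (String × Int)) (z : PySem.Dict String Int)
    (p : String → Bool) (f : String → Int)
    (hnd : (l.map Prod.fst).Nodup)
    (hfresh : ∀ e ∈ l, p e.1 = true → z.contains e.1 = false) :
    (l.foldl (fun z e => if p e.1 then z.insert e.1 (f e.1) else z) z).items
      = z.items ++ (l.filter (fun e => p e.1)).map (fun e => (e.1, f e.1)) := by
  induction l generalizing z with
  | nil => simp
  | cons hd t ih =>
    simp only [List.map_cons, List.nodup_cons] at hnd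
    by_cases hp : p hd.1 = true
    · have hz : z.contains hd.1 = false := hfresh hd (by simp) hp
      simp only [List.foldl_cons, hp, if_true, List.filter_cons, List.map_cons]
      rw [ih _ hnd.2 ?_]
      · rw [PySem.Dict.items_insert_of_not_contains (h := hz)]
        simp [List.append_assoc]
      · intro e he hpe
        have hne : e.1 ≠ hd.1 := by
          intro h; exact hnd.1 (h ▸ List.mem_map_of_mem he)
        rw [PySem.Dict.contains_insert]
        simp [hne, hfresh e (List.mem_cons_of_mem _ he) hpe]
    · simp only [Bool.not_eq_true] at hp
      simp only [List.foldl_cons, hp, List.filter_cons, if_false, Bool.false_eq_true]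
      rw [ih _ hnd.2 (fun e he hpe => hfresh e (List.mem_cons_of_mem _ he) hpe)]

-- B's loop shape: folding inserts and then filtering with a predicate that kills every
-- overwritten key splits into the filtered old items followed by the filtered new entries.
theorem foldl_insert_items_filter (l : List (String × Int)) (d : PySem.Dict String Int)
    (p : String → Bool)
    (hnd : (l.map Prod.fst).Nodup)
    (hkill : ∀ e ∈ l, d.contains e.1 = true → p e.1 = false) :
    ((l.foldl (fun d e => d.insert e.1 e.2) d).items).filter (fun e => p e.1)
      = d.items.filter (fun e => p e.1)
        ++ l.filter (fun e => p e.1 && !(d.contains e.1)) := by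
  induction l generalizing d with
  | nil => simp
  | cons hd t ih =>
    simp only [List.map_cons, List.nodup_cons] at hnd
    have hne : ∀ e ∈ t, e.1 ≠ hd.1 := by
      intro e he h; exact hnd.1 (h ▸ List.mem_map_of_mem he)
    have hcont : ∀ e ∈ t, (d.insert hd.1 hd.2).contains e.1 = d.contains e.1 := by
      intro e he
      rw [PySem.Dict.contains_insert]
      simp [hne e he]
    have hkill' : ∀ e ∈ t, (d.insert hd.1 hd.2).contains e.1 = true → p e.1 = false := by
      intro e he h
      exact hkill e (List.mem_cons_of_mem _ he) ((hcont e he) ▸ h)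
    have htail : t.filter (fun e => p e.1 && !((d.insert hd.1 hd.2).contains e.1))
        = t.filter (fun e => p e.1 && !(d.contains e.1)) := by
      apply List.filter_congr
      intro e he; rw [hcont e he]
    by_cases hc : d.contains hd.1 = true
    · have hpk : p hd.1 = false := hkill hd (by simp) hc
      simp only [List.foldl_cons]
      rw [ih _ hnd.2 hkill', htail]
      rw [PySem.Dict.items_insert_of_contains (h := hc)]
      rw [List.filter_map]
      have h1 : ((fun e : String × Int => p e.1) ∘
            (fun q : String × Int => if q.1 == hd.1 then (hd.1, hd.2) else q))
          = (fun e : String × Int => p e.1) := by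
        funext q
        by_cases hq : (q.1 == hd.1) = true
        · have hq' : q.1 = hd.1 := by simpa using hq
          simp [Function.comp_apply, hq']
        · have hq' : q.1 ≠ hd.1 := by simpa using hq
          simp [Function.comp_apply, hq']
      rw [h1]
      have h2 : (d.items.filter (fun e => p e.1)).map
          (fun q => if q.1 == hd.1 then (hd.1, hd.2) else q)
          = d.items.filter (fun e => p e.1) := by
        have : ∀ q ∈ d.items.filter (fun e : String × Int => p e.1),
            (if q.1 == hd.1 then (hd.1, hd.2) else q) = q := by
          intro q hq
          have hpq : p q.1 = true := (List.mem_filter.mp hq).2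
          have : ¬(q.1 == hd.1) = true := by
            intro h
            have : q.1 = hd.1 := by simpa using h
            rw [this, hpk] at hpq; exact Bool.false_ne_true hpq
          simp [this]
        calc (d.items.filter (fun e => p e.1)).map
              (fun q => if q.1 == hd.1 then (hd.1, hd.2) else q)
            = (d.items.filter (fun e => p e.1)).map id := List.map_congr_left this
          _ = d.items.filter (fun e => p e.1) := List.map_id _
      rw [h2]
      simp [hpk]
    · have hc' : d.contains hd.1 = false := by simpa using hc
      simp only [List.foldl_cons]
      rw [ih _ hnd.2 hkill', htail]
      rw [PySem.Dict.items_insert_of_not_contains (h := hc')]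
      rw [List.filter_append]
      by_cases hpk : p hd.1 = true
      · simp [hpk, hc', List.append_assoc]
      · simp only [Bool.not_eq_true] at hpk
        simp [hpk]

theorem merge_two_dicts_spec : Claim_equal_merge_two_dicts := by
  intro x y _ hpre
  obtain ⟨hx, hy⟩ := hpre
  unfold Spec_merge_two_dicts merge_two_dicts merge_two_dicts_alt
  simp only []
  set xd : PySem.Dict String Int := PySem.Dict.mk x with hxd
  set yd : PySem.Dict String Int := PySem.Dict.mk y with hyd
  set shared : PySem.Set String :=
    PySem.Set.inter (PySem.Set.ofList (x.map Prod.fst)) (y.map Prod.fst) with hshared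
  have hxitems : xd.items = x := rfl
  have hxkeys : xd.keys = x.map Prod.fst := by simp [hxd, PySem.Dict.keys]
  have hykeys : yd.keys = y.map Prod.fst := by simp [hyd, PySem.Dict.keys]
  have hxc : ∀ k, xd.contains k = true ↔ k ∈ x.map Prod.fst := by
    intro k; rw [PySem.Dict.contains_iff_mem_keys _ _, hxkeys]
  have hyc : ∀ k, yd.contains k = true ↔ k ∈ y.map Prod.fst := by
    intro k; rw [PySem.Dict.contains_iff_mem_keys _ _, hykeys]
  have hsc : ∀ k, PySem.Set.contains shared k = true ↔
      (k ∈ x.map Prod.fst ∧ k ∈ y.map Prod.fst) := by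
    intro k
    rw [PySem.Set.contains_iff, hshared, PySem.Set.mem_inter, PySem.Set.mem_ofList]
  have hgetD : ∀ e ∈ x, xd.getD e.1 0 = e.2 := by
    intro e he
    exact PySem.Dict.getD_of_mem_items (d := xd)
      (by rw [hxitems]; exact (Prod.mk.eta (p := e)) ▸ he)
      (by rw [hxkeys]; exact hx) 0
  -- the first of A's loops
  have hz1 : (x.foldl (fun z e => if !(yd.contains e.1) then z.insert e.1 (xd.getD e.1 0) else z)
      PySem.Dict.empty).items
      = x.filter (fun e => !(yd.contains e.1)) := by
    rw [foldl_guard_insert_items x PySem.Dict.empty (fun k => !(yd.contains k)) (fun k => xd.getD k 0) hx (by simp)]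
    have hemp : (PySem.Dict.empty : PySem.Dict String Int).items = [] := rfl
    rw [hemp, List.nil_append]
    calc (x.filter (fun e => !(yd.contains e.1))).map (fun e => (e.1, xd.getD e.1 0))
        = (x.filter (fun e => !(yd.contains e.1))).map id := by
          apply List.map_congr_left
          intro e he
          rw [hgetD e (List.mem_of_mem_filter he)]
          simp
      _ = _ := List.map_id _
  -- A's value
  have hA : (y.foldl (fun z e => if !(xd.contains e.1) then z.insert e.1 (yd.getD e.1 0) else z)
      (x.foldl (fun z e => if !(yd.contains e.1) then z.insert e.1 (xd.getD e.1 0) else z)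
        PySem.Dict.empty)).items
      = x.filter (fun e => !(yd.contains e.1)) ++ y.filter (fun e => !(xd.contains e.1)) := by
    rw [foldl_guard_insert_items y _ (fun k => !(xd.contains k)) (fun k => yd.getD k 0) hy ?_]
    · rw [hz1]
      congr 1
      calc (y.filter (fun e => !(xd.contains e.1))).map (fun e => (e.1, yd.getD e.1 0))
          = (y.filter (fun e => !(xd.contains e.1))).map id := by
            apply List.map_congr_left
            intro e he
            have hey : e ∈ y := List.mem_of_mem_filter he
            have : yd.getD e.1 0 = e.2 :=
              PySem.Dict.getD_of_mem_items (d := yd) ((Prod.mk.eta (p := e)) ▸ hey)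
                (by rw [hykeys]; exact hy) 0
            rw [this]
            simp
        _ = _ := List.map_id _
    · intro e he hpe
      rw [← Bool.not_eq_true]
      intro hcz
      have : e.1 ∈ x.map Prod.fst := by
        have hk := (PySem.Dict.contains_iff_mem_keys _ _).mp hcz
        rw [PySem.Dict.keys] at hk
        rw [hz1] at hk
        obtain ⟨q, hq, hq1⟩ := List.mem_map.mp hk
        exact hq1 ▸ List.mem_map_of_mem (List.mem_of_mem_filter hq)
      have hxt : xd.contains e.1 = true := (hxc e.1).mpr this
      simp [hxt] at hpe
  rw [hA]
  -- B's value
  rw [foldl_insert_items_filter y xd (fun k => !(PySem.Set.contains shared k)) hy ?_]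
  · rw [hxitems]
    congr 1
    · apply List.filter_congr
      intro e he
      have hex : e.1 ∈ x.map Prod.fst := List.mem_map_of_mem he
      cases hb : yd.contains e.1 with
      | true =>
        have : PySem.Set.contains shared e.1 = true :=
          (hsc e.1).mpr ⟨hex, (hyc e.1).mp hb⟩
        rw [this]
      | false =>
        have : PySem.Set.contains shared e.1 = false := by
          rw [← Bool.not_eq_true]
          intro h
          have := ((hsc e.1).mp h).2
          rw [(hyc e.1).mpr this] at hb
          simp at hb
        rw [this]
    · apply List.filter_congr
      intro e he
      cases hb : xd.contains e.1 with
      | true => simp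
      | false =>
        have : PySem.Set.contains shared e.1 = false := by
          rw [← Bool.not_eq_true]
          intro h
          have := ((hsc e.1).mp h).1
          rw [(hxc e.1).mpr this] at hb
          simp at hb
        simp only [this, Bool.not_false, Bool.and_true]
  · intro e he hce
    have hsm : PySem.Set.contains shared e.1 = true :=
      (hsc e.1).mpr ⟨(hxc e.1).mp hce, List.mem_map_of_mem he⟩
    rw [PySem.Set.contains_iff] at hsm
    simp [hsm]
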